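-- pv_equiv track=rewrite | github.com/rezaprasetya241/CodeWars | life path number.py | life_path_number
-- ===== SOURCE A (Python) =====
-- def life_path_number(birthdate):
--     li = birthdate.replace("-", "")
--     res = 0
--     for x in li:
--         res += int(x)
--
--         if(res>9):
--             res = res%10 + res //10
--     return res
-- ===== SOURCE B (Python) =====
-- def life_path_number(birthdate):
--     total = sum(int(c) for c in birthdate.replace("-", ""))
--     return 0 if total == 0 else (total - 1) % 9 + 1
-- ===== Notes on version B (the rewrite author's own statement) =====
-- stated objective: simpler
-- what changed: B sums all digits in one pass and returns the digital root by the closed form 0 if total==0 else (total-1)%9+1, instead of A's per-step res%10+res//10 collapse inside the loop.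
import Mathlib
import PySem

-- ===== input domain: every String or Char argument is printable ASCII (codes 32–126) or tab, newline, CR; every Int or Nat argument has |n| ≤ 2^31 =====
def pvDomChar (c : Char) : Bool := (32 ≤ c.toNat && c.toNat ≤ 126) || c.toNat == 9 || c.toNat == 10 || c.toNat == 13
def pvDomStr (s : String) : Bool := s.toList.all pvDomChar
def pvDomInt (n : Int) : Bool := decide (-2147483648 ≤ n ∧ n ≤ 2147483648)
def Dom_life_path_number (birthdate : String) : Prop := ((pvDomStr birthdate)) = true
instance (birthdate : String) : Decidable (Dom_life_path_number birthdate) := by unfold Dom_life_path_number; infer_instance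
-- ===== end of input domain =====

-- B replaces A's in-loop digit collapse by one total sum and a closed-form digital root.

-- ===== PORT A =====
-- int(x) for a one-char string: PySem.Int.ofStr?; getD 0 is unreachable on Pre_ (digit chars only).
def life_path_number (birthdate : String) : Int :=
  let li := (PySem.Str.replace birthdate "-" "").toList
  li.foldl (fun res x =>
    let res := res + (PySem.Int.ofStr? (String.singleton x)).getD 0
    if res > 9 then PySem.Int.mod res 10 + PySem.Int.floordiv res 10 else res) 0

-- ===== PORT B =====
def life_path_number_alt (birthdate : String) : Int :=
  let total := ((PySem.Str.replace birthdate "-" "").toList.map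
    (fun c => (PySem.Int.ofStr? (String.singleton c)).getD 0)).sum
  if total = 0 then 0 else PySem.Int.mod (total - 1) 9 + 1

-- ===== PRECONDITION & SPEC =====
-- Pre_ excludes exactly the inputs where A raises ValueError: any character other than '-' or a decimal digit.
def Pre_life_path_number (birthdate : String) : Prop :=
  birthdate.toList.all (fun c => ['-','0','1','2','3','4','5','6','7','8','9'].contains c) = true
instance (birthdate : String) : Decidable (Pre_life_path_number birthdate) := by unfold Pre_life_path_number; infer_instance
def pvWitness_life_path_number : String := "1990-01-01"
def Spec_life_path_number (birthdate : String) (out : Int) : Prop := out = life_path_number_alt birthdate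
instance (birthdate : String) (out : Int) : Decidable (Spec_life_path_number birthdate out) := by unfold Spec_life_path_number; infer_instance

-- ===== CLAIM (what is proved, stated in full; the proofs are below) =====
def Claim_equal_life_path_number : Prop := ∀ (birthdate : String), Dom_life_path_number birthdate → Pre_life_path_number birthdate → Spec_life_path_number birthdate (life_path_number birthdate)

-- ===== LEMMAS AND PROOFS =====

-- the digital root as B computes it
def pvDr (t : Int) : Int := if t = 0 then 0 else PySem.Int.mod (t - 1) 9 + 1

lemma pv_go_filter (fuel : Nat) (l acc : List Char) (h : l.length ≤ fuel) :
    PySem.Chars.replace.go ['-'] [] fuel l acc = acc.reverse ++ l.filter (fun c => c ≠ '-') := by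
  induction fuel generalizing l acc with
  | zero =>
    cases l with
    | nil => simp [PySem.Chars.replace.go]
    | cons c t => simp at h
  | succ n ih =>
    cases l with
    | nil => simp [PySem.Chars.replace.go]
    | cons c t =>
      have hlen : t.length ≤ n := by simpa using h
      simp only [PySem.Chars.replace.go]
      by_cases hc : c = '-'
      · subst hc
        have hp : List.isPrefixOf ['-'] ('-' :: t) = true := by simp [List.isPrefixOf]
        rw [hp]
        simp only [if_true, List.length_cons, List.length_nil, List.drop_succ_cons,
          List.drop_zero, List.reverse_nil, List.nil_append]
        rw [ih t acc hlen]
        simp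
      · have hp : List.isPrefixOf ['-'] (c :: t) = false := by
          simp only [List.isPrefixOf, Bool.and_eq_false_iff, beq_eq_false_iff_ne, ne_eq]
          exact Or.inl fun h' => (hc h'.symm).elim
        rw [hp]
        simp only [Bool.false_eq_true, if_false]
        rw [ih t (c :: acc) hlen]
        simp [hc]

lemma pv_replace_dash (s : String) :
    (PySem.Str.replace s "-" "").toList = s.toList.filter (fun c => c ≠ '-') := by
  rw [PySem.Str.toList_replace]
  show PySem.Chars.replace s.toList ['-'] [] = _
  rw [PySem.Chars.replace, if_neg (by simp)]
  exact pv_go_filter _ _ _ (le_refl _)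

-- value of one char as both ports compute it
def pvVal (c : Char) : Int := (PySem.Int.ofStr? (String.singleton c)).getD 0

lemma pv_val_bounds (c : Char)
    (h : c ∈ ['0','1','2','3','4','5','6','7','8','9']) : 0 ≤ pvVal c ∧ pvVal c ≤ 9 := by
  fin_cases h <;> decide

lemma pv_step (t d : Int) (ht : 0 ≤ t) (hd0 : 0 ≤ d) (hd9 : d ≤ 9) :
    (if pvDr t + d > 9 then PySem.Int.mod (pvDr t + d) 10 + PySem.Int.floordiv (pvDr t + d) 10
     else pvDr t + d) = pvDr (t + d) := by
  have m9 : ∀ a : Int, PySem.Int.mod a 9 = a % 9 :=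
    fun a => PySem.Int.mod_eq_emod_of_pos (by norm_num)
  have m10 : ∀ a : Int, PySem.Int.mod a 10 = a % 10 :=
    fun a => PySem.Int.mod_eq_emod_of_pos (by norm_num)
  have d10 : ∀ a : Int, PySem.Int.floordiv a 10 = a / 10 :=
    fun a => PySem.Int.floordiv_eq_ediv_of_pos (by norm_num)
  unfold pvDr
  simp only [m9, m10, d10]
  split_ifs <;> omega

lemma pv_loop (cs : List Char) (h : ∀ c ∈ cs, 0 ≤ pvVal c ∧ pvVal c ≤ 9) (t : Int) (ht : 0 ≤ t) :
    cs.foldl (fun res x =>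
        let res := res + pvVal x
        if res > 9 then PySem.Int.mod res 10 + PySem.Int.floordiv res 10 else res) (pvDr t)
      = pvDr (t + (cs.map pvVal).sum) := by
  induction cs generalizing t with
  | nil => simp
  | cons c cs ih =>
    have hc := h c (by simp)
    simp only [List.foldl_cons]
    rw [pv_step t (pvVal c) ht hc.1 hc.2]
    rw [ih (fun x hx => h x (by simp [hx])) (t + pvVal c) (by omega)]
    simp [List.map_cons, List.sum_cons]
    ring_nf

-- ===== VERDICT (by name: the statement is the Claim_ definition above) =====
theorem life_path_number_spec : Claim_equal_life_path_number := by
  intro birthdate _ hpre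
  unfold Spec_life_path_number life_path_number life_path_number_alt
  rw [pv_replace_dash]
  set cs := birthdate.toList.filter (fun c => c ≠ '-') with hcs
  unfold Pre_life_path_number at hpre
  rw [List.all_eq_true] at hpre
  have hdig : ∀ c ∈ cs, 0 ≤ pvVal c ∧ pvVal c ≤ 9 := by
    intro c hc
    rw [hcs, List.mem_filter] at hc
    have : c ∈ ['-','0','1','2','3','4','5','6','7','8','9'] := by simpa using hpre c hc.1
    have hne : c ≠ '-' := by simpa using hc.2
    apply pv_val_bounds
    simp only [List.mem_cons] at this
    rcases this with h | h
    · exact (hne h).elim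
    · simpa using h
  have h0 : (0 : Int) = pvDr 0 := by decide
  calc cs.foldl (fun res x =>
        let res := res + (PySem.Int.ofStr? (String.singleton x)).getD 0
        if res > 9 then PySem.Int.mod res 10 + PySem.Int.floordiv res 10 else res) 0
      = cs.foldl (fun res x =>
        let res := res + pvVal x
        if res > 9 then PySem.Int.mod res 10 + PySem.Int.floordiv res 10 else res) (pvDr 0) := by
        rw [← h0]; rfl
    _ = pvDr (0 + (cs.map pvVal).sum) := pv_loop cs hdig 0 (le_refl _)
    _ = _ := by rw [zero_add]; rfl
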